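-- pv_equiv track=rewrite | github.com/molindu/Distributed_Wordcount | distributed_wordcount/shared/utils.py | split_alphabet_among_proposers
-- ===== SOURCE A (Python) =====
-- import string
--
-- def split_alphabet_among_proposers(num_proposers):
--     """
--     Splits a-z into letter ranges based on the number of proposers.
--     Returns a list of lists like [['a','b','c'], ['d','e','f'], ...]
--     """
--     letters = list(string.ascii_lowercase)
--     chunk_size = len(letters) // num_proposers
--     remainder = len(letters) % num_proposers
--
--     ranges = []
--     start = 0
--
--     for i in range(num_proposers):
--         end = start + chunk_size + (1 if i < remainder else 0)
--         ranges.append(letters[start:end])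
--         start = end
--
--     return ranges
-- ===== SOURCE B (Python) =====
-- import string
--
-- def split_alphabet_among_proposers(num_proposers):
--     """
--     Peeling: repeatedly slice off the first chunk of ceil(len(letters)/n)
--     letters and continue with the remaining letters and n-1 proposers
--     (no global chunk_size/remainder is ever computed).
--     """
--     letters = list(string.ascii_lowercase)
--     chunks = []
--     n = num_proposers
--     while n > 0:
--         k = -(-len(letters) // n)  # ceil division
--         chunks.append(letters[:k])
--         letters = letters[k:]
--         n -= 1
--     return chunks
-- ===== Notes on version B (the rewrite author's own statement) =====
-- stated objective: alternative
-- what changed: Replaces the precomputed chunk_size/remainder partition (fixed size plus a 1-extra test per index) by a peeling loop: each step slices off the first ceil(len(letters)/n) letters and continues with the shrunken letter list and n-1 proposers, so no global quotient/remainder is ever computed.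
-- crash fix: On num_proposers = 0 A raises ZeroDivisionError (26 // 0); B's while loop never runs and it returns []. — e.g. on split_alphabet_among_proposers(0): A raises ZeroDivisionError, B returns []
import Mathlib
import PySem

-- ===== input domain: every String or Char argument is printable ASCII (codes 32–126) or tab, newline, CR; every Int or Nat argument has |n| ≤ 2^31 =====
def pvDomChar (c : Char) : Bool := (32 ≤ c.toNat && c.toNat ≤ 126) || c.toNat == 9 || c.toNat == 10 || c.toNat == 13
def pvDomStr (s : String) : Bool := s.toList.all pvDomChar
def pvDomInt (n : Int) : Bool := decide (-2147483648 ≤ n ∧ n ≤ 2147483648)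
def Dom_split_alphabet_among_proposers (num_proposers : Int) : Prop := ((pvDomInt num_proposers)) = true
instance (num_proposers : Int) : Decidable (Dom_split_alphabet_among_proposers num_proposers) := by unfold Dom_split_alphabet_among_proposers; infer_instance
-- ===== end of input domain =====

-- B replaces A's global chunk_size/remainder accumulator loop by a recursive peel:
-- slice off the first ceil(len/n) letters and recurse on the rest with n-1 proposers
-- (objective: alternative decomposition, same cost).

-- ===== PORT A =====
-- list(string.ascii_lowercase): the 26 one-letter strings
def pvLetters : List String :=
  ["a","b","c","d","e","f","g","h","i","j","k","l","m",
   "n","o","p","q","r","s","t","u","v","w","x","y","z"]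

def split_alphabet_among_proposers (num_proposers : Int) : List (List String) :=
  let letters := pvLetters
  let chunk_size := PySem.Int.floordiv (letters.length : Int) num_proposers
  let remainder := PySem.Int.mod (letters.length : Int) num_proposers
  ((PySem.List.pyRange 0 num_proposers 1).foldl
    (fun (st : List (List String) × Int) i =>
      let endd := st.2 + chunk_size + (if i < remainder then 1 else 0)
      (st.1 ++ [PySem.List.slice letters (some st.2) (some endd)], endd))
    ([], 0)).1

-- ===== PORT B =====
-- the while loop: state (chunks, letters, n); runs while n > 0, so it iterates n.toNat times
def pvGoB (chunks : List (List String)) (letters : List String) : Nat → List (List String)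
  | 0 => chunks
  | m + 1 =>
    let k := -(PySem.Int.floordiv (-(letters.length : Int)) ((m + 1 : Nat) : Int))
    pvGoB (chunks ++ [PySem.List.slice letters none (some k)])
          (PySem.List.slice letters (some k) none) m

def split_alphabet_among_proposers_alt (num_proposers : Int) : List (List String) :=
  pvGoB [] pvLetters num_proposers.toNat

-- ===== PRECONDITION & SPEC =====
-- A raises ZeroDivisionError on num_proposers = 0; that single input is excluded.
def Pre_split_alphabet_among_proposers (num_proposers : Int) : Prop := num_proposers ≠ 0
instance (num_proposers : Int) : Decidable (Pre_split_alphabet_among_proposers num_proposers) := by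
  unfold Pre_split_alphabet_among_proposers; infer_instance

def pvWitness_split_alphabet_among_proposers : Int := 3

-- On num_proposers = 0 A raises ZeroDivisionError (26 // 0); B returns [].
def Raises_split_alphabet_among_proposers (num_proposers : Int) : Prop := num_proposers = 0
instance (num_proposers : Int) : Decidable (Raises_split_alphabet_among_proposers num_proposers) := by
  unfold Raises_split_alphabet_among_proposers; infer_instance

def pvRaiseWitness_split_alphabet_among_proposers : Int := 0
def pvRaiseWitnessOut_split_alphabet_among_proposers : List (List String) := []

def Spec_split_alphabet_among_proposers (num_proposers : Int) (out : List (List String)) : Prop :=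
  out = split_alphabet_among_proposers_alt num_proposers
instance (num_proposers : Int) (out : List (List String)) : Decidable (Spec_split_alphabet_among_proposers num_proposers out) := by
  unfold Spec_split_alphabet_among_proposers; infer_instance

-- ===== CLAIM (what is proved, stated in full; the proofs are below) =====
def Claim_equal_split_alphabet_among_proposers : Prop :=
  ∀ (num_proposers : Int), Dom_split_alphabet_among_proposers num_proposers →
    Pre_split_alphabet_among_proposers num_proposers →
    Spec_split_alphabet_among_proposers num_proposers (split_alphabet_among_proposers num_proposers)

def Claim_raises_split_alphabet_among_proposers : Prop :=
  (∀ (num_proposers : Int), Dom_split_alphabet_among_proposers num_proposers →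
    Raises_split_alphabet_among_proposers num_proposers →
    ¬ Pre_split_alphabet_among_proposers num_proposers) ∧
  (Dom_split_alphabet_among_proposers (pvRaiseWitness_split_alphabet_among_proposers) ∧
    Raises_split_alphabet_among_proposers (pvRaiseWitness_split_alphabet_among_proposers) ∧
    split_alphabet_among_proposers_alt (pvRaiseWitness_split_alphabet_among_proposers) =
      pvRaiseWitnessOut_split_alphabet_among_proposers)

-- ===== LEMMAS AND PROOFS =====

-- Chunk start of the front-loaded partition: pvF q r i = i*q + min i r.
def pvF (q r i : Nat) : Nat := i * q + min i r

-- Common closed form both ports are reduced to: chunk i is drop (f i) then take (f (i+1) - f i).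
def pvC (ls : List String) (n : Nat) : List (List String) :=
  (List.range n).map (fun i =>
    (ls.drop (pvF (ls.length / n) (ls.length % n) i)).take
      (pvF (ls.length / n) (ls.length % n) (i+1) - pvF (ls.length / n) (ls.length % n) i))

-- Python's ceil division -(-L // k) in terms of Nat div/mod.
theorem pv_ceil (L k : Nat) (hk : 0 < k) :
    -(PySem.Int.floordiv (-(L:Int)) (k:Int)) = ((L / k + min 1 (L % k) : Nat) : Int) := by
  rw [PySem.Int.neg_floordiv_neg_eq_iff_of_pos (by exact_mod_cast hk)]
  obtain ⟨d, hd⟩ : ∃ d, L / k = d := ⟨_, rfl⟩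
  obtain ⟨r, hr⟩ : ∃ r, L % k = r := ⟨_, rfl⟩
  have h1 : k * d + r = L := by rw [← hd, ← hr]; exact Nat.div_add_mod L k
  have h2 : r < k := by rw [← hr]; exact Nat.mod_lt L hk
  rw [hd, hr]
  have hk' : (0:Int) < (k:Int) := by exact_mod_cast hk
  have h1' : (k:Int) * (d:Int) + (r:Int) = (L:Int) := by exact_mod_cast h1
  by_cases h : r = 0
  · subst h
    push_cast
    norm_num
    constructor
    · nlinarith
    · nlinarith
  · have hmin : min 1 r = 1 := by omega
    rw [hmin]
    have h3' : (1:Int) ≤ (r:Int) := by exact_mod_cast Nat.one_le_iff_ne_zero.mpr h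
    have h2' : (r:Int) < (k:Int) := by exact_mod_cast h2
    push_cast
    constructor
    · nlinarith
    · nlinarith

-- After peeling the first chunk, quotient is unchanged and the remainder loses one unit.
theorem pv_qr (L m : Nat) :
    (L - (L/(m+2) + min 1 (L%(m+2)))) / (m+1) = L/(m+2)
  ∧ (L - (L/(m+2) + min 1 (L%(m+2)))) % (m+1) = L%(m+2) - min 1 (L%(m+2)) := by
  obtain ⟨q, hq⟩ : ∃ q, L/(m+2) = q := ⟨_, rfl⟩
  obtain ⟨r, hr⟩ : ∃ r, L%(m+2) = r := ⟨_, rfl⟩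
  have h1 : (m+2)*q + r = L := by rw [← hq, ← hr]; exact Nat.div_add_mod L (m+2)
  have h2 : r < m+2 := by rw [← hr]; exact Nat.mod_lt L (by omega)
  rw [hq, hr]
  have hs : L - (q + min 1 r) = (r - min 1 r) + (m+1) * q := by
    have e : (m+2)*q = (m+1)*q + q := by ring
    rw [e] at h1
    omega
  rw [hs]
  constructor
  · rw [Nat.add_mul_div_left _ _ (by omega : 0 < m+1)]
    rw [Nat.div_eq_of_lt (by omega)]
    omega
  · rw [Nat.add_mul_mod_self_left]
    exact Nat.mod_eq_of_lt (by omega)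

-- The peel recursion without the accumulator (proof-side restatement of the loop).
def pvPeel (letters : List String) : Nat → List (List String)
  | 0 => []
  | m + 1 =>
    let k := -(PySem.Int.floordiv (-(letters.length : Int)) ((m + 1 : Nat) : Int))
    [PySem.List.slice letters none (some k)] ++
      pvPeel (PySem.List.slice letters (some k) none) m

-- The accumulating loop is the accumulator-free peel appended to the chunks so far.
theorem pvGoB_eq_acc (m : Nat) : ∀ (acc : List (List String)) (ls : List String),
    pvGoB acc ls m = acc ++ pvPeel ls m := by
  induction m with
  | zero => intro acc ls; simp [pvGoB, pvPeel]
  | succ m ih =>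
    intro acc ls
    simp only [pvGoB, pvPeel]
    rw [ih]
    simp

-- One-step unfolding of pvPeel (used so only the outer call is unfolded).
theorem pvPeel_succ (ls : List String) (m : Nat) :
    pvPeel ls (m + 1) =
      [PySem.List.slice ls none (some (-(PySem.Int.floordiv (-(ls.length : Int)) ((m + 1 : Nat) : Int))))] ++
        pvPeel (PySem.List.slice ls (some (-(PySem.Int.floordiv (-(ls.length : Int)) ((m + 1 : Nat) : Int)))) none) m := rfl

-- The peel equals the common closed form on any letter list and positive count.
theorem pvPeel_closed (m : Nat) : ∀ ls : List String, pvPeel ls (m + 1) = pvC ls (m + 1) := by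
  induction m with
  | zero =>
    intro ls
    simp only [pvPeel]
    rw [pv_ceil ls.length 1 one_pos]
    simp [pvC, pvF, PySem.List.slice_to_natCast, Nat.div_one, Nat.mod_one]
  | succ m ih =>
    intro ls
    rw [pvPeel_succ ls (m+1)]
    rw [pv_ceil ls.length (m+1+1) (by omega)]
    rw [PySem.List.slice_to_natCast, PySem.List.slice_from_natCast]
    rw [ih]
    unfold pvC
    rw [List.length_drop]
    rw [(pv_qr ls.length m).1, (pv_qr ls.length m).2]
    obtain ⟨q, hq⟩ : ∃ q, ls.length/(m+2) = q := ⟨_, rfl⟩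
    obtain ⟨r, hr⟩ : ∃ r, ls.length%(m+2) = r := ⟨_, rfl⟩
    rw [hq, hr]
    conv_rhs => rw [List.range_succ_eq_map]
    simp only [List.map_cons, List.map_map, List.singleton_append]
    congr 1
    · simp [pvF]
    · apply List.map_congr_left
      intro i _
      simp only [Function.comp_apply, pvF, Nat.succ_eq_add_one]
      rw [List.drop_drop]
      have e1 : (i+1)*q = i*q + q := by ring
      have e2 : (i+1+1)*q = i*q + q + q := by ring
      have hidx : (q + min 1 r) + (i*q + min i (r - min 1 r)) = (i+1)*q + min (i+1) r := by
        rw [e1]; omega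
      have hlen : ((i+1)*q + min (i+1) (r - min 1 r)) - (i*q + min i (r - min 1 r))
          = ((i+1+1)*q + min (i+1+1) r) - ((i+1)*q + min (i+1) r) := by
        rw [e1, e2]; omega
      rw [hidx, hlen]

-- Loop invariant for A: after k iterations A's state is the closed-form prefix and start index.
theorem pv_loop_inv (c r : Int) (hr : 0 ≤ r) (k : Nat) :
    ((PySem.List.pyRange 0 (k : Int) 1).foldl
      (fun (st : List (List String) × Int) i =>
        let endd := st.2 + c + (if i < r then 1 else 0)
        (st.1 ++ [PySem.List.slice pvLetters (some st.2) (some endd)], endd))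
      ([], 0))
    = ((PySem.List.pyRange 0 (k : Int) 1).map (fun i =>
        PySem.List.slice pvLetters (some (i * c + min i r))
                                   (some ((i + 1) * c + min (i + 1) r))),
       (k : Int) * c + min (k : Int) r) := by
  induction k with
  | zero => simp [PySem.List.pyRange_one_eq_nil]; omega
  | succ k ih =>
    have hsplit : PySem.List.pyRange 0 ((k + 1 : Nat) : Int) 1
        = PySem.List.pyRange 0 (k : Int) 1 ++ [(k : Int)] := by
      push_cast
      exact PySem.List.pyRange_one_succ_right (by positivity)
    rw [hsplit, List.foldl_append, ih, List.map_append]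
    simp only [List.foldl_cons, List.foldl_nil, List.map_cons, List.map_nil]
    have h1 : (k : Int) * c + min (k : Int) r + c + (if (k : Int) < r then 1 else 0)
        = ((k : Int) + 1) * c + min ((k : Int) + 1) r := by
      by_cases h : (k : Int) < r
      · rw [if_pos h, min_eq_left (by omega), min_eq_left (by omega)]; ring
      · rw [if_neg h, min_eq_right (by omega), min_eq_right (by omega)]; ring
    simp only [Prod.mk.injEq]
    constructor
    · rw [h1]
    · rw [h1]; push_cast; ring

-- A equals the common closed form on positive counts.
theorem pvA_closed (m : Nat) :
    split_alphabet_among_proposers ((m + 1 : Nat) : Int) = pvC pvLetters (m + 1) := by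
  simp only [split_alphabet_among_proposers]
  rw [PySem.Int.floordiv_natCast, PySem.Int.mod_natCast]
  rw [pv_loop_inv _ _ (by positivity) (m+1)]
  rw [PySem.List.pyRange_one]
  simp only [sub_zero, Int.toNat_natCast, List.map_map, pvC]
  apply List.map_congr_left
  intro j _
  simp only [Function.comp_apply, zero_add, pvF]
  have hb1 : ((j:Int) * ((pvLetters.length / (m+1) : Nat):Int) + min (j:Int) ((pvLetters.length % (m+1) : Nat):Int))
      = ((j * (pvLetters.length / (m+1)) + min j (pvLetters.length % (m+1)) : Nat) : Int) := by
    push_cast; ring_nf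
  have hb2 : (((j:Int) + 1) * ((pvLetters.length / (m+1) : Nat):Int) + min ((j:Int)+1) ((pvLetters.length % (m+1) : Nat):Int))
      = (((j+1) * (pvLetters.length / (m+1)) + min (j+1) (pvLetters.length % (m+1)) : Nat) : Int) := by
    push_cast; ring_nf
  rw [hb1, hb2, PySem.List.slice_natCast]

theorem pv_eq (n : Int) (hn : n ≠ 0) :
    split_alphabet_among_proposers n = split_alphabet_among_proposers_alt n := by
  rcases lt_or_gt_of_ne hn with h | h
  · have h0 : n.toNat = 0 := by omega
    simp [split_alphabet_among_proposers, split_alphabet_among_proposers_alt,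
      PySem.List.pyRange_one_eq_nil (le_of_lt h), h0, pvGoB]
  · obtain ⟨m, hm⟩ : ∃ m : Nat, n = ((m + 1 : Nat) : Int) := by
      refine ⟨(n - 1).toNat, ?_⟩; omega
    subst hm
    rw [pvA_closed]
    have : split_alphabet_among_proposers_alt ((m + 1 : Nat) : Int) = pvPeel pvLetters (m + 1) := by
      rw [split_alphabet_among_proposers_alt, Int.toNat_natCast, pvGoB_eq_acc, List.nil_append]
    rw [this, pvPeel_closed]

-- ===== VERDICT (by name: the statement is the Claim_ definition above) =====
theorem split_alphabet_among_proposers_spec : Claim_equal_split_alphabet_among_proposers := by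
  intro n _ hpre
  unfold Spec_split_alphabet_among_proposers
  exact pv_eq n hpre

@[simp] theorem split_alphabet_among_proposers_raises : Claim_raises_split_alphabet_among_proposers := by
  unfold Claim_raises_split_alphabet_among_proposers
  exact ⟨by intro n _ h hp; exact hp h, by decide⟩
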